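-- pv_equiv track=rewrite | github.com/hamedcode/port-based-v2ray-configs | categorize_all_protocols.py | generate_stats_table
-- ===== SOURCE A (Python) =====
-- COMMON_PORTS = [80, 443, 8080, 2053, 2083, 2087, 2096]
--
-- def generate_stats_table(proto_port_counts):
--     ports_sorted = sorted(COMMON_PORTS)
--     protocols_sorted = sorted(proto_port_counts.keys())
--
--     header = "| Protocol | " + " | ".join(map(str, ports_sorted)) + " | Total |\n"
--     header += "|----------|" + "|".join(["---"] * (len(ports_sorted) + 1)) + "|\n"
--
--     rows = ""
--     for proto in protocols_sorted:
--         total = 0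
--         row = f"| {proto} "
--         for port in ports_sorted:
--             count = proto_port_counts[proto].get(port, 0)
--             total += count
--             row += f"| {count} "
--         row += f"| {total} |\n"
--         rows += row
--
--     totals_row = "| **Total** "
--     for port in ports_sorted:
--         totals_row += f"| {sum(proto_port_counts[p].get(port, 0) for p in protocols_sorted)} "
--     totals_row += f"| {sum(sum(ports.values()) for ports in proto_port_counts.values())} |\n"
--
--     return header + rows + totals_row
-- ===== SOURCE B (Python) =====
-- COMMON_PORTS = [80, 443, 8080, 2053, 2083, 2087, 2096]
--
-- def generate_stats_table(proto_port_counts):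
--     ports_sorted = sorted(COMMON_PORTS)
--     header_cells = ["Protocol"] + [str(p) for p in ports_sorted] + ["Total"]
--     header = "| " + " | ".join(header_cells) + " |\n"
--     header += "|----------|" + "|".join(["---"] * (len(ports_sorted) + 1)) + "|\n"
--
--     column_totals = [0] * len(ports_sorted)
--     grand_total = 0
--     row_parts = []
--     for proto in sorted(proto_port_counts.keys()):
--         counts = [proto_port_counts[proto].get(p, 0) for p in ports_sorted]
--         column_totals = [t + c for t, c in zip(column_totals, counts)]
--         grand_total += sum(proto_port_counts[proto].values())
--         cells = [proto] + [str(c) for c in counts] + [str(sum(counts))]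
--         row_parts.append("| " + " | ".join(cells) + " |\n")
--
--     totals_cells = ["**Total**"] + [str(t) for t in column_totals] + [str(grand_total)]
--     return header + "".join(row_parts) + "| " + " | ".join(totals_cells) + " |\n"
-- ===== Notes on version B (the rewrite author's own statement) =====
-- stated objective: alternative
-- what changed: B builds each row as a joined cell list and accumulates per-column totals and the grand total in the single protocol pass, emitting the totals row from those accumulators instead of A's separate per-port re-scan of all protocols and nested grand-total scan.
import Mathlib
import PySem

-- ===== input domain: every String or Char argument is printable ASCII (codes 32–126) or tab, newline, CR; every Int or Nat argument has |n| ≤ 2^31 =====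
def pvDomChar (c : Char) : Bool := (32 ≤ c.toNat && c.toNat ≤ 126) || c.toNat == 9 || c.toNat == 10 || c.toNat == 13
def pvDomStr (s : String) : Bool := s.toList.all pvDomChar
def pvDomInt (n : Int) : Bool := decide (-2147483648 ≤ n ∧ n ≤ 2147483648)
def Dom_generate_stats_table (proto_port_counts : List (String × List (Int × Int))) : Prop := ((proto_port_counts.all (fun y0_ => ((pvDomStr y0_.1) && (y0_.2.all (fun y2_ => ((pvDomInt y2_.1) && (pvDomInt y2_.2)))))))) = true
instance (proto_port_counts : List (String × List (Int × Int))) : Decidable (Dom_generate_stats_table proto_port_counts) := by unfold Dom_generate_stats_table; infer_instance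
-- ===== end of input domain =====

-- B emits the totals row from column/grand accumulators maintained in the single protocol pass
-- instead of A's separate per-port re-scan; equivalence of the RETURN value is proved.

def COMMON_PORTS : List Int := [80, 443, 8080, 2053, 2083, 2087, 2096]

-- the dict arguments as PySem.Dict (the assoc lists are the dicts in insertion order)
def pvDictOf (proto_port_counts : List (String × List (Int × Int))) :
    PySem.Dict String (PySem.Dict Int Int) :=
  PySem.Dict.ofList (proto_port_counts.map (fun p => (p.1, PySem.Dict.ofList p.2)))

-- ===== PORT A =====
def generate_stats_table (proto_port_counts : List (String × List (Int × Int))) : String :=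
  let d := pvDictOf proto_port_counts
  let ports_sorted := PySem.List.sorted COMMON_PORTS (fun x => x) false
  let protocols_sorted := PySem.List.sorted (PySem.Dict.keys d) (fun x => x) false
  let header := "| Protocol | ".toList ++
      PySem.Chars.join " | ".toList (ports_sorted.map PySem.Int.toChars) ++ " | Total |\n".toList
  let header := header ++ "|----------|".toList ++
      PySem.Chars.join "|".toList (List.replicate (ports_sorted.length + 1) "---".toList) ++ "|\n".toList
  let rows := protocols_sorted.foldl (fun rows proto =>
      -- proto ∈ d.keys, so proto_port_counts[proto] never raises: getD with empty default is exact
      let st := ports_sorted.foldl (fun (st : Int × List Char) port =>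
          let count := (PySem.Dict.getD d proto PySem.Dict.empty).getD port 0
          (st.1 + count, st.2 ++ "| ".toList ++ PySem.Int.toChars count ++ " ".toList))
        ((0 : Int), "| ".toList ++ proto.toList ++ " ".toList)
      rows ++ st.2 ++ "| ".toList ++ PySem.Int.toChars st.1 ++ " |\n".toList) []
  let totals_row := ports_sorted.foldl (fun tr port =>
      tr ++ "| ".toList ++
        PySem.Int.toChars ((protocols_sorted.map
          (fun p => (PySem.Dict.getD d p PySem.Dict.empty).getD port 0)).sum) ++ " ".toList)
    "| **Total** ".toList
  let totals_row := totals_row ++ "| ".toList ++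
      PySem.Int.toChars (((PySem.Dict.values d).map (fun pd => (PySem.Dict.values pd).sum)).sum) ++ " |\n".toList
  String.mk (header ++ rows ++ totals_row)

-- ===== PORT B =====
def generate_stats_table_alt (proto_port_counts : List (String × List (Int × Int))) : String :=
  let d := pvDictOf proto_port_counts
  let ports_sorted := PySem.List.sorted COMMON_PORTS (fun x => x) false
  let header_cells := "Protocol".toList :: ports_sorted.map PySem.Int.toChars ++ ["Total".toList]
  let header := "| ".toList ++ PySem.Chars.join " | ".toList header_cells ++ " |\n".toList ++
      "|----------|".toList ++
      PySem.Chars.join "|".toList (List.replicate (ports_sorted.length + 1) "---".toList) ++ "|\n".toList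
  let st := (PySem.List.sorted (PySem.Dict.keys d) (fun x => x) false).foldl
      (fun (st : (List Int × Int) × List (List Char)) proto =>
        let counts := ports_sorted.map (fun p => (PySem.Dict.getD d proto PySem.Dict.empty).getD p 0)
        let column_totals := ((st.1.1.zip counts).map (fun q => q.1 + q.2))
        let grand_total := st.1.2 + (PySem.Dict.values (PySem.Dict.getD d proto PySem.Dict.empty)).sum
        let cells := proto.toList :: counts.map PySem.Int.toChars ++ [PySem.Int.toChars counts.sum]
        ((column_totals, grand_total),
         st.2 ++ ["| ".toList ++ PySem.Chars.join " | ".toList cells ++ " |\n".toList]))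
      ((List.replicate ports_sorted.length (0 : Int), (0 : Int)), [])
  let totals_cells := "**Total**".toList :: st.1.1.map PySem.Int.toChars ++ [PySem.Int.toChars st.1.2]
  String.mk (header ++ PySem.Chars.join [] st.2 ++
      "| ".toList ++ PySem.Chars.join " | ".toList totals_cells ++ " |\n".toList)

-- ===== PRECONDITION & SPEC =====
def Spec_generate_stats_table (proto_port_counts : List (String × List (Int × Int))) (out : String) : Prop := out = generate_stats_table_alt proto_port_counts
instance (proto_port_counts : List (String × List (Int × Int))) (out : String) : Decidable (Spec_generate_stats_table proto_port_counts out) := by unfold Spec_generate_stats_table; infer_instance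

-- ===== CLAIM (what is proved, stated in full; the proofs are below) =====
def Claim_equal_generate_stats_table : Prop := ∀ (proto_port_counts : List (String × List (Int × Int))), Dom_generate_stats_table proto_port_counts → Spec_generate_stats_table proto_port_counts (generate_stats_table proto_port_counts)

-- ===== LEMMAS AND PROOFS =====

def pvPorts : List Int := [80, 443, 2053, 2083, 2087, 2096, 8080]

lemma ports_sorted_eq : PySem.List.sorted COMMON_PORTS (fun x => x) false = pvPorts := by decide

lemma join_nil_sep (l : List (List Char)) : PySem.Chars.join [] l = l.flatten := by
  induction l with
  | nil => rfl
  | cons x xs ih =>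
    cases xs with
    | nil => simp [PySem.Chars.join, List.intercalate, List.intersperse]
    | cons y ys =>
      simp [PySem.Chars.join, List.intercalate, List.intersperse] at ih ⊢
      exact ih

lemma zip_map_add (xs : List Int) (f g : Int → Int) :
    ((xs.map f).zip (xs.map g)).map (fun q => q.1 + q.2) = xs.map (fun x => f x + g x) := by
  simp [List.zip_map', List.map_map]

-- B's single fold over the protocols, split into its three independent components
lemma loopB_eq (d : PySem.Dict String (PySem.Dict Int Int)) (protos : List String)
    (ct : List Int) (g : Int) (rp : List (List Char)) :
    List.foldl
      (fun st proto =>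
        ((List.map (fun q => q.1 + q.2)
              (st.1.1.zip (List.map (fun p => (d.getD proto PySem.Dict.empty).getD p 0) pvPorts)),
            st.1.2 + (d.getD proto PySem.Dict.empty).values.sum),
          st.2 ++ ["| ".toList ++ PySem.Chars.join " | ".toList (proto.toList :: List.map PySem.Int.toChars (List.map (fun p => (d.getD proto PySem.Dict.empty).getD p 0) pvPorts) ++ [PySem.Int.toChars (List.map (fun p => (d.getD proto PySem.Dict.empty).getD p 0) pvPorts).sum]) ++ " |\n".toList])) ((ct, g), rp) protos
    = ((List.foldl (fun ct proto => List.map (fun q => q.1 + q.2) (ct.zip (List.map (fun p => (d.getD proto PySem.Dict.empty).getD p 0) pvPorts))) ct protos,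
        g + (List.map (fun proto => (d.getD proto PySem.Dict.empty).values.sum) protos).sum),
       rp ++ List.map (fun proto => "| ".toList ++ PySem.Chars.join " | ".toList (proto.toList :: List.map PySem.Int.toChars (List.map (fun p => (d.getD proto PySem.Dict.empty).getD p 0) pvPorts) ++ [PySem.Int.toChars (List.map (fun p => (d.getD proto PySem.Dict.empty).getD p 0) pvPorts).sum]) ++ " |\n".toList) protos) := by
  induction protos generalizing ct g rp with
  | nil => simp
  | cons p ps ih =>
    simp only [List.foldl_cons]
    rw [ih]
    simp only [List.map_cons, List.sum_cons, add_assoc, List.append_assoc, List.singleton_append]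

lemma colAux (d : PySem.Dict String (PySem.Dict Int Int)) (protos : List String) (h : Int → Int) :
    List.foldl (fun ct proto => List.map (fun q => q.1 + q.2) (ct.zip (List.map (fun p => (d.getD proto PySem.Dict.empty).getD p 0) pvPorts))) (pvPorts.map h) protos
    = pvPorts.map (fun port => h port + (List.map (fun p => (d.getD p PySem.Dict.empty).getD port 0) protos).sum) := by
  induction protos generalizing h with
  | nil => simp
  | cons p ps ih =>
    simp only [List.foldl_cons, zip_map_add,
      ih (fun port => h port + (d.getD p PySem.Dict.empty).getD port 0), List.map_cons, List.sum_cons]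
    exact List.map_congr_left (fun x _ => by ring)

lemma col_full (d : PySem.Dict String (PySem.Dict Int Int)) (protos : List String) :
    List.foldl (fun ct proto => List.map (fun q => q.1 + q.2) (ct.zip (List.map (fun p => (d.getD proto PySem.Dict.empty).getD p 0) pvPorts))) (List.replicate pvPorts.length 0) protos
    = pvPorts.map (fun port => (List.map (fun p => (d.getD p PySem.Dict.empty).getD port 0) protos).sum) := by
  have h0 : List.replicate pvPorts.length (0 : Int) = pvPorts.map (fun _ => 0) := rfl
  rw [h0, colAux]
  simp

-- one row of A's table equals the joined-cells row of B
lemma rowstep (d : PySem.Dict String (PySem.Dict Int Int)) (proto : String) (acc : List Char) :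
    acc ++ (List.foldl (fun st port => (st.1 + (d.getD proto PySem.Dict.empty).getD port 0, st.2 ++ "| ".toList ++ PySem.Int.toChars ((d.getD proto PySem.Dict.empty).getD port 0) ++ " ".toList)) (0, "| ".toList ++ proto.toList ++ " ".toList) pvPorts).2 ++ "| ".toList ++ PySem.Int.toChars (List.foldl (fun st port => (st.1 + (d.getD proto PySem.Dict.empty).getD port 0, st.2 ++ "| ".toList ++ PySem.Int.toChars ((d.getD proto PySem.Dict.empty).getD port 0) ++ " ".toList)) (0, "| ".toList ++ proto.toList ++ " ".toList) pvPorts).1 ++ " |\n".toList = acc ++ ("| ".toList ++ PySem.Chars.join " | ".toList (proto.toList :: List.map PySem.Int.toChars (List.map (fun p => (d.getD proto PySem.Dict.empty).getD p 0) pvPorts) ++ [PySem.Int.toChars (List.map (fun p => (d.getD proto PySem.Dict.empty).getD p 0) pvPorts).sum]) ++ " |\n".toList) := by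
  simp [pvPorts, PySem.Chars.join, List.intercalate, List.intersperse, add_assoc]

lemma rowsA_eq (d : PySem.Dict String (PySem.Dict Int Int)) (protos : List String) (acc : List Char) :
    List.foldl
      (fun rows proto => rows ++ (List.foldl (fun st port => (st.1 + (d.getD proto PySem.Dict.empty).getD port 0, st.2 ++ "| ".toList ++ PySem.Int.toChars ((d.getD proto PySem.Dict.empty).getD port 0) ++ " ".toList)) (0, "| ".toList ++ proto.toList ++ " ".toList) pvPorts).2 ++ "| ".toList ++ PySem.Int.toChars (List.foldl (fun st port => (st.1 + (d.getD proto PySem.Dict.empty).getD port 0, st.2 ++ "| ".toList ++ PySem.Int.toChars ((d.getD proto PySem.Dict.empty).getD port 0) ++ " ".toList)) (0, "| ".toList ++ proto.toList ++ " ".toList) pvPorts).1 ++ " |\n".toList)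
      acc protos
    = acc ++ (List.map (fun proto => "| ".toList ++ PySem.Chars.join " | ".toList (proto.toList :: List.map PySem.Int.toChars (List.map (fun p => (d.getD proto PySem.Dict.empty).getD p 0) pvPorts) ++ [PySem.Int.toChars (List.map (fun p => (d.getD proto PySem.Dict.empty).getD p 0) pvPorts).sum]) ++ " |\n".toList) protos).flatten := by
  induction protos generalizing acc with
  | nil => simp
  | cons p ps ih =>
    simp only [List.foldl_cons]
    rw [ih, rowstep d p acc]
    simp only [List.map_cons, List.flatten_cons, List.append_assoc]

-- A's grand total (over the dict's values) equals the sum over the sorted keys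
lemma grand_eq (ppc : List (String × List (Int × Int))) :
    (List.map (fun pd => pd.values.sum) (pvDictOf ppc).values).sum
    = (List.map (fun proto => ((pvDictOf ppc).getD proto PySem.Dict.empty).values.sum)
        (PySem.List.sorted (pvDictOf ppc).keys (fun x => x) false)).sum := by
  unfold pvDictOf
  rw [PySem.Dict.values_eq_map_keys _ (PySem.Dict.nodup_keys_ofList _) PySem.Dict.empty, List.map_map]
  exact (((PySem.List.sorted_perm _ _ _).map _).sum_eq).symm

lemma tables_eq (ppc : List (String × List (Int × Int))) :
    generate_stats_table ppc = generate_stats_table_alt ppc := by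
  simp only [generate_stats_table, generate_stats_table_alt, ports_sorted_eq]
  refine congrArg String.mk ?_
  rw [loopB_eq, rowsA_eq, col_full, grand_eq, join_nil_sep]
  simp only [List.nil_append, zero_add]
  simp [pvPorts, PySem.Chars.join, List.intercalate, List.intersperse]

-- ===== VERDICT (by name: the statement is the Claim_ definition above) =====
theorem generate_stats_table_spec : Claim_equal_generate_stats_table := by
  intro ppc _
  exact tables_eq ppc
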